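-- pv_equiv track=rewrite | github.com/malaonda222/Python | Esercizi/ER/AltreSimulazioni/EserciziVari/6.py | analyze_strings
-- ===== SOURCE A (Python) =====
-- def analyze_strings(strings: list[str]) -> dict[str, str]:
--     if len(strings) == 0:
--         raise ValueError("Lista vuota.")
--     else:
--         piu_corta = strings[0]
--         piu_lunga = strings[0]
--         prima = strings[0]
--         ultima = strings[0]
--
--         for stringa in strings:
--
--             # confronta lunghezza
--             lunghezza = len(stringa)
--             if lunghezza < len(piu_corta):
--                 piu_corta = stringa
--             elif lunghezza > len(piu_lunga):
--                 piu_lunga = stringa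
--
--             # confronta ordine alfabetico
--             if stringa > ultima:
--                 ultima = stringa
--             elif stringa < prima:
--                 prima = stringa
--
--         return {
--             "shortest": piu_corta,
--             "longest": piu_lunga,
--             "first_alphabetically": prima,
--             "last_alphabetically": ultima
--         }
-- ===== SOURCE B (Python) =====
-- def analyze_strings(strings: list[str]) -> dict[str, str]:
--     if len(strings) == 0:
--         raise ValueError("Lista vuota.")
--     by_len = sorted(strings, key=len)
--     by_len_desc = sorted(strings, key=len, reverse=True)
--     alpha = sorted(strings)
--     alpha_desc = sorted(strings, reverse=True)
--     return {
--         "shortest": by_len[0],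
--         "longest": by_len_desc[0],
--         "first_alphabetically": alpha[0],
--         "last_alphabetically": alpha_desc[0],
--     }
-- ===== Notes on version B (the rewrite author's own statement) =====
-- stated objective: alternative
-- what changed: Replaces A's single fused tracking loop with a sort-then-pick algorithm: four stable sorts (by length, by length descending, lexicographic, lexicographic descending) whose first elements give the four answers, relying on sort stability to reproduce A's first-extremal tie-breaking.
import Mathlib
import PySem

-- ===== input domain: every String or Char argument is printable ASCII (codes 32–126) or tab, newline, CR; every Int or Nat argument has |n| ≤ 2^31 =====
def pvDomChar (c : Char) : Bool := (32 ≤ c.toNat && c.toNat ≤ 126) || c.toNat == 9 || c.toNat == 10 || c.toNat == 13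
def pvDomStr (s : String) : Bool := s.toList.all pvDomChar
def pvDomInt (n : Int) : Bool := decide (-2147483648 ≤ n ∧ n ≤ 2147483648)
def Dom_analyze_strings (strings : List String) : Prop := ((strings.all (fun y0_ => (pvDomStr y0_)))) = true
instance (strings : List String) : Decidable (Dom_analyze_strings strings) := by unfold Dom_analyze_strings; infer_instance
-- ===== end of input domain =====

-- B replaces A's single fused tracking loop with a sort-then-pick algorithm: four stable
-- sorts (by length, by length reversed, lexicographic, lexicographic reversed) whose first
-- elements give the four answers; stability reproduces A's first-extremal tie-breaking (alternative).


-- ===== PORT A =====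
-- the loop body of A: state (piu_corta, piu_lunga, prima, ultima)
def analyzeStepA (acc : String × String × String × String) (stringa : String) :
    String × String × String × String :=
  let (pc, pl, pr, ul) := acc
  let lunghezza := PySem.Str.len stringa
  let (pc, pl) :=
    if lunghezza < PySem.Str.len pc then (stringa, pl)
    else if lunghezza > PySem.Str.len pl then (pc, stringa)
    else (pc, pl)
  let (pr, ul) :=
    if stringa > ul then (pr, stringa)
    else if stringa < pr then (stringa, ul)
    else (pr, ul)
  (pc, pl, pr, ul)

def analyze_strings (strings : List String) : List (String × String) :=
  match strings with
  | [] => []  -- Python raises ValueError("Lista vuota.") here; excluded by Pre_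
  | s0 :: _ =>
    let st := strings.foldl analyzeStepA (s0, s0, s0, s0)
    [("shortest", st.1), ("longest", st.2.1),
     ("first_alphabetically", st.2.2.1), ("last_alphabetically", st.2.2.2)]

-- ===== PORT B =====
def analyze_strings_alt (strings : List String) : List (String × String) :=
  match strings with
  | [] => []  -- Python raises ValueError("Lista vuota.") here; excluded by Pre_
  | _ :: _ =>
    let by_len := PySem.List.sorted strings PySem.Str.len
    let by_len_desc := PySem.List.sorted strings PySem.Str.len true
    let alpha := PySem.List.sorted strings (fun s => s)
    let alpha_desc := PySem.List.sorted strings (fun s => s) true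
    -- the four [0] indexings of Source B; each sorted list is nonempty since strings is
    match by_len, by_len_desc, alpha, alpha_desc with
    | sh :: _, lo :: _, fi :: _, la :: _ =>
      [("shortest", sh), ("longest", lo),
       ("first_alphabetically", fi), ("last_alphabetically", la)]
    | _, _, _, _ => []

-- ===== PRECONDITION & SPEC =====
-- Pre_ excludes only the empty list, on which the Python A raises ValueError("Lista vuota.").
def Pre_analyze_strings (strings : List String) : Prop := strings ≠ []
instance (strings : List String) : Decidable (Pre_analyze_strings strings) := by
  unfold Pre_analyze_strings; infer_instance

def pvWitness_analyze_strings : List String := ["ab", "c"]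

def Spec_analyze_strings (strings : List String) (out : List (String × String)) : Prop := out = analyze_strings_alt strings
instance (strings : List String) (out : List (String × String)) : Decidable (Spec_analyze_strings strings out) := by unfold Spec_analyze_strings; infer_instance

-- ===== CLAIM (what is proved, stated in full; the proofs are below) =====
def Claim_equal_analyze_strings : Prop := ∀ (strings : List String), Dom_analyze_strings strings → Pre_analyze_strings strings → Spec_analyze_strings strings (analyze_strings strings)

-- ===== LEMMAS AND PROOFS =====

-- head of a stable insertion: decided by the incoming element vs the old head only
theorem head?_insertBy {α : Type} (before : α → α → Bool) (x y : α) (ys : List α) :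
    (PySem.List.insertBy before x (y :: ys)).head?
      = some (if before x y then x else y) := by
  simp only [PySem.List.insertBy]
  split_ifs with h <;> simp [h]

-- head of the insertion-sort fold = the running "first extremal" fold
theorem head?_foldl_insertBy {α : Type} (before : α → α → Bool) (t : List α)
    (a : α) (acc : List α) (hacc : acc.head? = some a) :
    (t.foldl (fun acc x => PySem.List.insertBy before x acc) acc).head?
      = some (t.foldl (fun m x => if before x m then x else m) a) := by
  induction t generalizing a acc with
  | nil => simpa using hacc
  | cons x t ih =>
    simp only [List.foldl_cons]
    cases acc with
    | nil => simp at hacc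
    | cons y ys =>
      have hy : y = a := by simpa using hacc
      subst hy
      exact ih _ _ (head?_insertBy before x y ys)

-- head of sorted(s0 :: t, key) = first minimal element under strict <
theorem head?_sorted {α κ : Type} [LinearOrder κ] (key : α → κ) (s0 : α) (t : List α) :
    (PySem.List.sorted (s0 :: t) key).head?
      = some (t.foldl (fun m x => if key x < key m then x else m) s0) := by
  rw [PySem.List.sorted_eq_foldl_insertBy]
  simp only [List.foldl_cons]
  have h0 : (PySem.List.insertBy (fun a b => decide (key a < key b)) s0 []).head?
      = some s0 := by simp [PySem.List.insertBy]
  rw [head?_foldl_insertBy _ t s0 _ h0]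
  simp

-- head of sorted(s0 :: t, key, reverse=True) = first maximal element under strict <
theorem head?_sorted_rev {α κ : Type} [LinearOrder κ] (key : α → κ) (s0 : α) (t : List α) :
    (PySem.List.sorted (s0 :: t) key true).head?
      = some (t.foldl (fun m x => if key m < key x then x else m) s0) := by
  rw [PySem.List.sorted_rev_eq_foldl_insertBy]
  simp only [List.foldl_cons]
  have h0 : (PySem.List.insertBy (fun a b => decide (key b < key a)) s0 []).head?
      = some s0 := by simp [PySem.List.insertBy]
  rw [head?_foldl_insertBy _ t s0 _ h0]
  simp

-- A's fused fold splits into the four independent running extrema,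
-- under the invariants len pc ≤ len pl and pr ≤ ul.
theorem lenPair_eq (pc pl x : String) (h1 : PySem.Str.len pc ≤ PySem.Str.len pl) :
    (if PySem.Str.len x < PySem.Str.len pc then (x, pl)
     else if PySem.Str.len x > PySem.Str.len pl then (pc, x) else (pc, pl))
      = ((if PySem.Str.len x < PySem.Str.len pc then x else pc),
         (if PySem.Str.len pl < PySem.Str.len x then x else pl)) := by
  simp only [PySem.Str.len, gt_iff_lt] at *
  split_ifs <;> first | rfl | omega

theorem alphaPair_eq (pr ul x : String) (h2 : pr ≤ ul) :
    (if x > ul then (pr, x) else if x < pr then (x, ul) else (pr, ul))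
      = ((if x < pr then x else pr), (if ul < x then x else ul)) := by
  simp only [gt_iff_lt]
  split_ifs with hA hB
  · exact absurd hB (not_lt.mpr (le_of_lt (lt_of_le_of_lt h2 hA)))
  · rfl
  · rfl
  · rfl

theorem lenPair_inv (pc pl x : String) (h1 : PySem.Str.len pc ≤ PySem.Str.len pl) :
    PySem.Str.len (if PySem.Str.len x < PySem.Str.len pc then x else pc)
      ≤ PySem.Str.len (if PySem.Str.len pl < PySem.Str.len x then x else pl) := by
  simp only [PySem.Str.len] at *
  split_ifs <;> omega

theorem alphaPair_inv (pr ul x : String) (h2 : pr ≤ ul) :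
    (if x < pr then x else pr) ≤ (if ul < x then x else ul) := by
  split_ifs with hx hu hu'
  · exact le_refl x
  · exact not_lt.mp hu
  · exact le_of_lt (lt_of_le_of_lt h2 hu')
  · exact h2

theorem foldl_analyzeStepA_split (t : List String) (pc pl pr ul : String)
    (h1 : PySem.Str.len pc ≤ PySem.Str.len pl) (h2 : pr ≤ ul) :
    t.foldl analyzeStepA (pc, pl, pr, ul)
      = (t.foldl (fun m x => if PySem.Str.len x < PySem.Str.len m then x else m) pc,
         t.foldl (fun m x => if PySem.Str.len m < PySem.Str.len x then x else m) pl,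
         t.foldl (fun m x => if x < m then x else m) pr,
         t.foldl (fun m x => if m < x then x else m) ul) := by
  induction t generalizing pc pl pr ul with
  | nil => rfl
  | cons x t ih =>
    simp only [List.foldl_cons]
    have step : analyzeStepA (pc, pl, pr, ul) x
        = ((if PySem.Str.len x < PySem.Str.len pc then x else pc),
           (if PySem.Str.len pl < PySem.Str.len x then x else pl),
           (if x < pr then x else pr),
           (if ul < x then x else ul)) := by
      simp only [analyzeStepA]
      rw [lenPair_eq pc pl x h1, alphaPair_eq pr ul x h2]
    rw [step]
    exact ih _ _ _ _ (lenPair_inv pc pl x h1) (alphaPair_inv pr ul x h2)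

-- ===== VERDICT (by name: the statement is the Claim_ definition above) =====
theorem analyze_strings_spec : Claim_equal_analyze_strings := by
  intro strings _ hpre
  unfold Spec_analyze_strings
  match strings, hpre with
  | s0 :: t, _ =>
    -- heads of B's four sorted lists, as folds
    have h1 := head?_sorted PySem.Str.len s0 t
    have h2 := head?_sorted_rev PySem.Str.len s0 t
    have h3 := head?_sorted (fun s : String => s) s0 t
    have h4 := head?_sorted_rev (fun s : String => s) s0 t
    obtain ⟨r1, e1⟩ := List.head?_eq_some_iff.mp h1
    obtain ⟨r2, e2⟩ := List.head?_eq_some_iff.mp h2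
    obtain ⟨r3, e3⟩ := List.head?_eq_some_iff.mp h3
    obtain ⟨r4, e4⟩ := List.head?_eq_some_iff.mp h4
    show analyze_strings (s0 :: t) = analyze_strings_alt (s0 :: t)
    unfold analyze_strings analyze_strings_alt
    simp only [e1, e2, e3, e4, List.foldl_cons]
    have h0 : analyzeStepA (s0, s0, s0, s0) s0 = (s0, s0, s0, s0) := by
      simp [analyzeStepA]
    rw [h0, foldl_analyzeStepA_split t s0 s0 s0 s0 le_rfl le_rfl]
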